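-- pv_equiv track=rewrite | github.com/yunus-tuncbilek/intermediateProgrammingK12 | appleby_contestp3_second_try.py | calc
-- ===== SOURCE A (Python) =====
-- def calc(exp):
--     '''
--
--     calc takes in an infix notation and returns the value
--
--     calc("(+ 1 1)") -> calc("1") + calc("1") -> 1 + 1 -> 2
--
--     '''
--     res = 0
--     curr = 0
--     sign = 1
--     for n in exp:
--         if n.isnumeric():
--             curr = curr * 10 + int(n)
--         elif n == "-":
--             sign = -1
--         else:
--             res += sign * curr
--             curr = 0
--             sign = 1
--     res += sign * curr
--     return res
-- ===== SOURCE B (Python) =====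
-- def calc(exp):
--     # Tokenize: every char that is neither a digit nor '-' is a separator.
--     # Each token contributes its digit value, negated iff it contains '-'.
--     tokens = ''.join(c if c.isdigit() or c == '-' else ' ' for c in exp).split()
--     total = 0
--     for t in tokens:
--         value = 0
--         for c in t:
--             if c != '-':
--                 value = value * 10 + int(c)
--         total += -value if '-' in t else value
--     return total
-- ===== Notes on version B (the rewrite author's own statement) =====
-- stated objective: alternative
-- what changed: A is one stateful scan carrying (res, curr, sign) per character; B first replaces every separator character (anything that is neither a digit nor a minus sign) by a space and str.split()s the string into tokens, then sums each token's digit value, negated iff the token contains a minus sign.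
import Mathlib
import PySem

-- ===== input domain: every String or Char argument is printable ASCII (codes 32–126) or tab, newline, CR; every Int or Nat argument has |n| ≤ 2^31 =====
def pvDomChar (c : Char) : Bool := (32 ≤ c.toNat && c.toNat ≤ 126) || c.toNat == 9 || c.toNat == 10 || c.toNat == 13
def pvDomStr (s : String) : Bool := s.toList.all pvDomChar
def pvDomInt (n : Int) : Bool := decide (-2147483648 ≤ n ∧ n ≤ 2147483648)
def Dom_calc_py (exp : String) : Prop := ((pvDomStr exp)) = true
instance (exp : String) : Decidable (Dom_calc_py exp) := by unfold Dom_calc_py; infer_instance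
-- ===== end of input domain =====

-- B re-decomposes A's single stateful scan as tokenize-then-sum (split on separator chars,
-- value each token independently); objective: alternative decomposition, same cost.

-- ===== PORT A =====
-- one step of A's loop; state = (res, curr, sign).
-- n.isnumeric() is ported as PySem.Chars.isdigit (exact on the printable-ASCII domain);
-- int(n) on a digit char n is its decimal value (n.toNat - 48).
def calcStep (st : Int × Int × Int) (n : Char) : Int × Int × Int :=
  if PySem.Chars.isdigit n then (st.1, st.2.1 * 10 + ((n.toNat : Int) - 48), st.2.2)
  else if n = '-' then (st.1, st.2.1, -1)
  else (st.1 + st.2.2 * st.2.1, 0, 1)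

def calc_py (exp : String) : Int :=
  let st := exp.toList.foldl calcStep (0, 0, 1)
  st.1 + st.2.2 * st.2.1

-- ===== PORT B =====
-- ''.join(c if c.isdigit() or c == '-' else ' ' for c in exp), one char
def pvTr (c : Char) : Char := if PySem.Chars.isdigit c || c = '-' then c else ' '

-- the body of B's per-token loop: value accumulation then '-value if '-' in t else value'
def pvTokVal (t : List Char) : Int :=
  let value := t.foldl (fun v c => if c ≠ '-' then v * 10 + ((c.toNat : Int) - 48) else v) 0
  if PySem.Chars.isIn ['-'] t then -value else value

def calc_py_alt (exp : String) : Int :=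
  let tokens := PySem.Chars.split₀ (exp.toList.map pvTr)
  tokens.foldl (fun total t => total + pvTokVal t) 0

-- ===== PRECONDITION & SPEC =====
def Spec_calc_py (exp : String) (out : Int) : Prop := out = calc_py_alt exp
instance (exp : String) (out : Int) : Decidable (Spec_calc_py exp out) := by unfold Spec_calc_py; infer_instance

-- ===== CLAIM (what is proved, stated in full; the proofs are below) =====
def Claim_equal_calc_py : Prop := ∀ (exp : String), Dom_calc_py exp → Spec_calc_py exp (calc_py exp)

-- ===== LEMMAS AND PROOFS =====

-- common spec: remaining input processed with partial value `curr` and sign `sign`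
def pvG (curr sign : Int) : List Char → Int
  | [] => sign * curr
  | c :: cs =>
      if PySem.Chars.isdigit c then pvG (curr * 10 + ((c.toNat : Int) - 48)) sign cs
      else if c = '-' then pvG curr (-1) cs
      else sign * curr + pvG 0 1 cs

-- value and sign represented by a reversed partial token `cur` (split₀.go's accumulator)
def pvVal (cur : List Char) : Int :=
  cur.reverse.foldl (fun v c => if c ≠ '-' then v * 10 + ((c.toNat : Int) - 48) else v) 0

def pvSgn (cur : List Char) : Int := if '-' ∈ cur then -1 else 1

theorem pv_isspace_of_isdigit (c : Char) (h : PySem.Chars.isdigit c = true) :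
    PySem.Chars.isspace c = false := by
  simp only [PySem.Chars.isdigit, Bool.and_eq_true, decide_eq_true_eq, Char.le_def,
    UInt32.le_iff_toNat_le] at h
  have e0 : ('0').val.toNat = 48 := rfl
  have e9 : ('9').val.toNat = 57 := rfl
  rw [e0, e9] at h
  simp only [PySem.Chars.isspace, Char.toNat, Bool.or_eq_false_iff, Bool.and_eq_false_iff,
    decide_eq_false_iff_not]
  omega

theorem pv_ne_dash_of_isdigit (c : Char) (h : PySem.Chars.isdigit c = true) : c ≠ '-' := by
  intro hc; subst hc; simp [PySem.Chars.isdigit] at h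

theorem pvTokVal_reverse (cur : List Char) :
    pvTokVal cur.reverse = pvSgn cur * pvVal cur := by
  have hmem : PySem.Chars.isIn ['-'] cur.reverse = true ↔ '-' ∈ cur := by
    rw [PySem.Chars.isIn_iff_infix, List.singleton_infix_iff, List.mem_reverse]
  unfold pvTokVal pvSgn pvVal
  by_cases h : '-' ∈ cur
  · simp [hmem.mpr h, h]
  · have : PySem.Chars.isIn ['-'] cur.reverse = false := by
      rcases Bool.eq_false_or_eq_true (PySem.Chars.isIn ['-'] cur.reverse) with h' | h'
      · exact absurd (hmem.mp h') h
      · exact h'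
    simp [this, h]

theorem pvVal_cons (c : Char) (cur : List Char) :
    pvVal (c :: cur) =
      if c ≠ '-' then pvVal cur * 10 + ((c.toNat : Int) - 48) else pvVal cur := by
  unfold pvVal
  rw [List.reverse_cons, List.foldl_append]
  simp

-- A's loop computes pvG
theorem pv_calcA (l : List Char) : ∀ (res curr sign : Int),
    ((l.foldl calcStep (res, curr, sign)).1 +
      (l.foldl calcStep (res, curr, sign)).2.2 * (l.foldl calcStep (res, curr, sign)).2.1)
      = res + pvG curr sign l := by
  induction l with
  | nil => intro res curr sign; simp [pvG]
  | cons c cs ih =>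
      intro res curr sign
      by_cases hd : PySem.Chars.isdigit c = true
      · simp only [List.foldl_cons, calcStep, hd, if_true, pvG, ih]
      · by_cases hm : c = '-'
        · subst hm
          simp only [List.foldl_cons, calcStep, hd, Bool.false_eq_true, if_false, if_true, pvG, ih]
        · simp only [List.foldl_cons, calcStep, hd, Bool.false_eq_true, if_false, hm, pvG, ih]
          ring

-- B's tokenizer + per-token valuation computes pvG, for any partial state of split₀.go
theorem pv_calcB (l : List Char) : ∀ (cur : List Char) (acc : List (List Char)),
    ((PySem.Chars.split₀.go (l.map pvTr) cur acc).map pvTokVal).sum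
      = (acc.reverse.map pvTokVal).sum + pvG (pvVal cur) (pvSgn cur) l := by
  induction l with
  | nil =>
      intro cur acc
      by_cases h : cur = []
      · subst h; simp [PySem.Chars.split₀.go, pvG, pvVal, pvSgn]
      · have hE : cur.isEmpty = false := by simp [h]
        simp only [List.map_nil, PySem.Chars.split₀.go, hE, Bool.false_eq_true, if_false]
        rw [List.reverse_cons, List.map_append, List.sum_append]
        simp [pvTokVal_reverse, pvG]
  | cons c cs ih =>
      intro cur acc
      rw [List.map_cons]
      by_cases hd : PySem.Chars.isdigit c = true
      · have htr : pvTr c = c := by simp [pvTr, hd]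
        rw [htr]
        simp only [PySem.Chars.split₀.go, pv_isspace_of_isdigit c hd, Bool.false_eq_true, if_false]
        rw [ih (c :: cur) acc]
        have hne := pv_ne_dash_of_isdigit c hd
        simp [pvG, hd, pvVal_cons, hne, Ne.symm hne, pvSgn]
      · by_cases hm : c = '-'
        · subst hm
          have htr : pvTr '-' = '-' := by simp [pvTr]
          rw [htr]
          have hsp : PySem.Chars.isspace '-' = false := by decide
          simp only [PySem.Chars.split₀.go, hsp, Bool.false_eq_true, if_false]
          rw [ih ('-' :: cur) acc]
          simp [pvG, hd, pvVal_cons, pvSgn]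
        · have htr : pvTr c = ' ' := by simp [pvTr, hd, hm]
          rw [htr]
          have hsp : PySem.Chars.isspace ' ' = true := by decide
          simp only [PySem.Chars.split₀.go, hsp, if_true]
          by_cases h : cur = []
          · subst h
            simp only [List.isEmpty_nil, if_true]
            rw [ih [] acc]
            simp [pvG, hd, hm, pvVal, pvSgn]
          · have hE : cur.isEmpty = false := by simp [h]
            simp only [hE, Bool.false_eq_true, if_false]
            rw [ih [] (cur.reverse :: acc)]
            simp only [List.reverse_cons, List.map_append, List.sum_append, List.map_cons,
              List.map_nil, List.sum_cons, List.sum_nil, add_zero, pvTokVal_reverse, pvG, hd,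
              Bool.false_eq_true, if_false, hm]
            have hv : pvVal ([] : List Char) = 0 := rfl
            have hs : pvSgn ([] : List Char) = 1 := rfl
            rw [hv, hs]; ring

-- ===== VERDICT (by name: the statement is the Claim_ definition above) =====
theorem calc_py_spec : Claim_equal_calc_py := by
  intro exp _
  unfold Spec_calc_py
  show (exp.toList.foldl calcStep (0, 0, 1)).1 +
      (exp.toList.foldl calcStep (0, 0, 1)).2.2 * (exp.toList.foldl calcStep (0, 0, 1)).2.1
    = (PySem.Chars.split₀ (exp.toList.map pvTr)).foldl (fun total t => total + pvTokVal t) 0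
  have hB : (PySem.Chars.split₀ (exp.toList.map pvTr)).foldl
      (fun total t => total + pvTokVal t) 0
      = ((PySem.Chars.split₀ (exp.toList.map pvTr)).map pvTokVal).sum := by
    rw [← List.foldl_map, List.sum_eq_foldl]
  rw [pv_calcA exp.toList 0 0 1, hB]
  simp only [PySem.Chars.split₀]
  rw [pv_calcB exp.toList [] []]
  have hv : pvVal ([] : List Char) = 0 := rfl
  have hs : pvSgn ([] : List Char) = 1 := rfl
  rw [hv, hs]
  simp
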